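-- pv_equiv track=rewrite | github.com/primozflander/code-jam | Qualification_round/google_coding_contest_2.py | printLatin
-- ===== SOURCE A (Python) =====
-- def printLatin(n):
--     k = n + 1
--     output = []
--     for i in range(1, n + 1, 1):
--         temp = k
--         while (temp <= n):
--             output.append(temp)
--             temp += 1
--         for j in range(1, k):
--             output.append(j)
--         k -= 1
--     return [output[i:i + n] for i in range(0, len(output), n)]
-- ===== SOURCE B (Python) =====
-- def printLatin(n):
--     return [[(j - i) % n + 1 for j in range(n)] for i in range(n)]
-- ===== Notes on version B (the rewrite author's own statement) =====
-- stated objective: simpler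
-- what changed: Replaces the append-tail-then-head flat-list construction plus slice-based reshaping with a direct closed-form nested comprehension computing each cell as ((j - i) % n) + 1.
-- outside the precondition, e.g. on printLatin(0): A raises ValueError, B returns []
import Mathlib
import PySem

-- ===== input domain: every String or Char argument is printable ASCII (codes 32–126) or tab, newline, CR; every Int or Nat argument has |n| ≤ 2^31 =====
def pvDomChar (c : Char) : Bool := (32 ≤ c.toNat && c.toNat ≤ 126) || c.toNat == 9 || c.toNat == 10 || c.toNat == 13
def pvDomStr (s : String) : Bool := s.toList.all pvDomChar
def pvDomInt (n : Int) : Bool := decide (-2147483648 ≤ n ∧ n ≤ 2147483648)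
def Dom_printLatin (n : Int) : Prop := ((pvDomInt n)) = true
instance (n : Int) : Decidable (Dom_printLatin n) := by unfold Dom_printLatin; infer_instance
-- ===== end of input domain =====

-- B replaces A's flat append-then-reshape construction by a closed-form nested
-- comprehension: cell (i, j) of the n×n Latin square is ((j - i) % n) + 1.

-- ===== PORT A =====
-- the 'while temp <= n: output.append(temp); temp += 1' loop, literally
def pvAWhile (temp n : Int) (out : List Int) : List Int :=
  if temp ≤ n then pvAWhile (temp + 1) n (out ++ [temp]) else out
termination_by (n + 1 - temp).toNat
decreasing_by omega

def printLatin (n : Int) : List (List Int) :=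
  let st := (PySem.List.pyRange 1 (n + 1) 1).foldl
    (fun (st : Int × List Int) _i =>
      (st.1 - 1,
        (PySem.List.pyRange 1 st.1 1).foldl (fun acc j => acc ++ [j]) (pvAWhile st.1 n st.2)))
    (n + 1, [])
  (PySem.List.pyRange 0 (st.2.length : Int) n).map
    (fun i => PySem.List.slice st.2 (some i) (some (i + n)))

-- ===== PORT B =====
def printLatin_alt (n : Int) : List (List Int) :=
  (PySem.List.pyRange 0 n 1).map (fun i =>
    (PySem.List.pyRange 0 n 1).map (fun j => PySem.Int.mod (j - i) n + 1))

-- ===== PRECONDITION & SPEC =====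
-- Pre_ excludes only n = 0, on which A raises ValueError (step-0 range in the reshaping comprehension).
def Pre_printLatin (n : Int) : Prop := n ≠ 0
instance (n : Int) : Decidable (Pre_printLatin n) := by unfold Pre_printLatin; infer_instance
def pvWitness_printLatin : Int := 3

def Spec_printLatin (n : Int) (out : List (List Int)) : Prop := out = printLatin_alt n
instance (n : Int) (out : List (List Int)) : Decidable (Spec_printLatin n out) := by unfold Spec_printLatin; infer_instance

-- ===== CLAIM (what is proved, stated in full; the proofs are below) =====
def Claim_equal_printLatin : Prop := ∀ (n : Int), Dom_printLatin n → Pre_printLatin n → Spec_printLatin n (printLatin n)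

-- ===== LEMMAS AND PROOFS =====

-- one row of A's flat output (tail range [k..n] then head range [1..k-1])
def pvRowA (n k : Int) : List Int :=
  PySem.List.pyRange k (n + 1) 1 ++ PySem.List.pyRange 1 k 1

-- one row of B
def pvRowB (n i : Int) : List Int :=
  (PySem.List.pyRange 0 n 1).map (fun j => PySem.Int.mod (j - i) n + 1)

lemma pvAWhile_eq (temp n : Int) (out : List Int) :
    pvAWhile temp n out = out ++ PySem.List.pyRange temp (n + 1) 1 := by
  fun_induction pvAWhile temp n out with
  | case1 t o h ih =>
      rw [ih, PySem.List.pyRange_one_cons (by omega : t < n + 1)]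
      simp
  | case2 t o h =>
      rw [PySem.List.pyRange_one_eq_nil (by omega)]
      simp

lemma pvFoldA (n : Int) : ∀ (l : List Int) (k : Int) (out : List Int),
    l.foldl (fun (st : Int × List Int) _i =>
      (st.1 - 1,
        (PySem.List.pyRange 1 st.1 1).foldl (fun acc j => acc ++ [j]) (pvAWhile st.1 n st.2)))
      (k, out)
    = (k - l.length,
       out ++ ((List.range l.length).map (fun (t : Nat) => pvRowA n (k - (t : Int)))).flatten) := by
  intro l
  induction l with
  | nil => intro k out; simp
  | cons x xs ih =>
      intro k out
      rw [List.foldl_cons]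
      show List.foldl _ (k - 1, (PySem.List.pyRange 1 k 1).foldl (fun acc j => acc ++ [j]) (pvAWhile k n out)) xs = _
      rw [ih, PySem.List.foldl_append_singleton_eq_self, pvAWhile_eq]
      refine Prod.ext ?_ ?_
      · show k - 1 - (xs.length : Int) = k - ((xs.length + 1 : Nat) : Int)
        push_cast; ring
      · show out ++ PySem.List.pyRange k (n + 1) 1 ++ PySem.List.pyRange 1 k 1 ++
          ((List.range xs.length).map (fun (t : Nat) => pvRowA n (k - 1 - (t : Int)))).flatten = _
        simp only [List.length_cons, List.range_succ_eq_map, List.map_cons, List.map_map,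
          List.flatten_cons]
        rw [show pvRowA n (k - ((0:Nat) : Int)) = PySem.List.pyRange k (n + 1) 1 ++ PySem.List.pyRange 1 k 1 by simp [pvRowA]]
        simp only [List.append_assoc]
        congr 3
        congr 1
        apply List.map_congr_left
        intro t _
        show pvRowA n (k - 1 - (t : Int)) = pvRowA n (k - ((t + 1 : Nat) : Int))
        congr 1
        push_cast
        ring

lemma pvRow_eq (n : Int) (t : Nat) (hn : 0 < n) (ht : (t : Int) < n) :
    pvRowA n (n + 1 - t) = pvRowB n t := by
  unfold pvRowA pvRowB
  rw [PySem.List.pyRange_one_append 0 (t : Int) n (by omega) (by omega), List.map_append]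
  congr 1
  · rw [PySem.List.pyRange_one, PySem.List.pyRange_one, List.map_map]
    rw [show ((t : Int) - 0).toNat = t by omega,
        show ((n + 1) - (n + 1 - (t : Int))).toNat = t by omega]
    apply List.map_congr_left
    intro k hk
    simp only [List.mem_range] at hk
    simp only [Function.comp_apply]
    rw [PySem.Int.mod_eq_emod_of_pos (a := 0 + (k : Int) - t) hn]
    have : ((0 : Int) + k - t) % n = (0 + k - t + n) % n := by rw [Int.add_emod_right]
    rw [this, Int.emod_eq_of_lt (by omega) (by omega)]
    omega
  · rw [PySem.List.pyRange_one, PySem.List.pyRange_one, List.map_map]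
    rw [show (n - (t : Int)).toNat = (n + 1 - (t : Int) - 1).toNat by omega]
    apply List.map_congr_left
    intro k hk
    simp only [List.mem_range] at hk
    simp only [Function.comp_apply]
    rw [PySem.Int.mod_eq_emod_of_pos (a := (t : Int) + k - t) hn]
    rw [show ((t : Int) + k - t) = (k : Int) by ring, Int.emod_eq_of_lt (by omega) (by omega)]
    omega

lemma pvDropFlatten (c : Nat) : ∀ (rows : List (List Int)) (t : Nat),
    (∀ r ∈ rows, r.length = c) → t < rows.length →
    (rows.flatten.drop (c * t)).take c = rows[t]! := by
  intro rows
  induction rows with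
  | nil => intro t _ ht; simp at ht
  | cons r rest ih =>
      intro t h ht
      cases t with
      | zero =>
          simp only [Nat.mul_zero, List.drop_zero, List.flatten_cons]
          rw [List.take_append_of_le_length (by rw [h r (by simp)])]
          simp [h r (by simp), List.take_of_length_le]
      | succ t =>
          have hr : r.length = c := h r (by simp)
          rw [List.flatten_cons, show c * (t + 1) = r.length + c * t by rw [hr]; ring,
              List.drop_append]
          rw [List.drop_eq_nil_of_le (by omega : r.length ≤ r.length + c * t),
              Nat.add_sub_cancel_left, List.nil_append]
          rw [ih t (fun r hr => h r (by simp [hr])) (by simpa using ht)]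
          simp

lemma pvChunk (c : Nat) (hc : 0 < c) (rows : List (List Int))
    (h : ∀ r ∈ rows, r.length = c) :
    (PySem.List.pyRange 0 (rows.flatten.length : Int) (c : Int)).map
      (fun i => PySem.List.slice rows.flatten (some i) (some (i + c))) = rows := by
  have hlen : rows.flatten.length = rows.length * c := by
    rw [List.length_flatten]
    rw [show rows.map List.length = List.replicate rows.length c by
      have := List.eq_replicate_of_mem (a := c) (l := rows.map List.length) (by
        intro x hx
        obtain ⟨r, hr, rfl⟩ := List.mem_map.mp hx
        exact h r hr)
      simpa using this]
    simp [List.sum_replicate]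
  rw [PySem.List.pyRange_of_pos 0 (rows.flatten.length : Int)
        (by exact_mod_cast hc : (0 : Int) < (c : Int))]
  have hcount : (if (0 : Int) < (rows.flatten.length : Int) then
      (((rows.flatten.length : Int) - 0 + c - 1) / c).toNat else 0) = rows.length := by
    rcases Nat.eq_zero_or_pos rows.length with hM | hM
    · simp [hlen, hM]
    · rw [if_pos (by rw [hlen]; positivity)]
      rw [hlen]
      rw [show ((rows.length * c : Nat) : Int) - 0 + c - 1 = (c - 1) + rows.length * c by push_cast; ring]
      rw [Int.add_mul_ediv_right _ _ (by exact_mod_cast hc.ne' : (c : Int) ≠ 0)]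
      rw [Int.ediv_eq_zero_of_lt (by omega) (by omega)]
      omega
  rw [hcount, List.map_map]
  apply List.ext_getElem (by simp)
  intro i hi hi2
  simp only [List.getElem_map, List.getElem_range, Function.comp_apply]
  rw [show (0 : Int) + (c : Int) * (i : Int) = ((c * i : Nat) : Int) by push_cast; ring]
  rw [PySem.List.slice_natCast_add]
  rw [pvDropFlatten c rows i h hi2, getElem!_pos rows i hi2]

-- ===== VERDICT (by name: the statement is the Claim_ definition above) =====
theorem printLatin_spec : Claim_equal_printLatin := by
  intro n _ hn
  unfold Spec_printLatin
  
  rcases lt_or_gt_of_ne hn with h | h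
  · simp only [printLatin, printLatin_alt]
    rw [PySem.List.pyRange_one_eq_nil (by omega : n + 1 ≤ 1),
        PySem.List.pyRange_one_eq_nil (by omega : n ≤ 0)]
    simp [PySem.List.pyRange]
  · simp only [printLatin, printLatin_alt]
    rw [pvFoldA]
    simp only [List.nil_append]
    rw [PySem.List.length_pyRange_one]
    have hlen : ((n + 1) - 1).toNat = n.toNat := by omega
    rw [hlen]
    have hrows : (List.range n.toNat).map (fun (t : Nat) => pvRowA n (n + 1 - (t : Int)))
        = (List.range n.toNat).map (fun (t : Nat) => pvRowB n (t : Int)) := by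
      apply List.map_congr_left
      intro t ht
      simp only [List.mem_range] at ht
      exact pvRow_eq n t h (by omega)
    rw [hrows]
    have hrhs : (PySem.List.pyRange 0 n 1).map (fun i =>
        (PySem.List.pyRange 0 n 1).map (fun j => PySem.Int.mod (j - i) n + 1))
        = (List.range n.toNat).map (fun (t : Nat) => pvRowB n (t : Int)) := by
      rw [PySem.List.pyRange_one 0 n, List.map_map]
      rw [show (n - 0).toNat = n.toNat by omega]
      apply List.map_congr_left
      intro t _
      simp only [pvRowB]
      rw [PySem.List.pyRange_one 0 n, List.map_map, show (n - 0).toNat = n.toNat by omega]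
      simp
    rw [hrhs]
    rw [show (n : Int) = ((n.toNat : Nat) : Int) by omega]
    apply pvChunk n.toNat (by omega)
    intro r hr
    obtain ⟨t, _, rfl⟩ := List.mem_map.mp hr
    simp only [pvRowB]
    rw [List.length_map, PySem.List.length_pyRange_one]
    omega
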